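-- pv_equiv track=rewrite | github.com/rnsherpa/SEMVAR | semvar/utils.py | no_valid_kmers
-- ===== SOURCE A (Python) =====
-- def no_valid_kmers(sequence, sem_len):
--     valid_bases = {'A', 'C', 'T', 'G'}
--     current_length = 0
--
--     for char in sequence:
--         if char in valid_bases:
--             current_length += 1
--             if current_length >= sem_len:
--                 return False
--         else:
--             current_length = 0
--
--     return True
-- ===== SOURCE B (Python) =====
-- def no_valid_kmers(sequence, sem_len):
--     # Segment the sequence into maximal runs of valid/invalid bases,
--     # then check every valid run is shorter than sem_len.
--     valid = frozenset('ACTG')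
--     groups = []  # (is_valid, run_length) for each maximal run
--     i, n = 0, len(sequence)
--     while i < n:
--         key = sequence[i] in valid
--         j = i + 1
--         while j < n and (sequence[j] in valid) == key:
--             j += 1
--         groups.append((key, j - i))
--         i = j
--     return all(length < sem_len for key, length in groups if key)
-- ===== Notes on version B (the rewrite author's own statement) =====
-- stated objective: alternative
-- what changed: B replaces A's single per-character scan with a running counter and early False return by segmenting the sequence into maximal valid/invalid runs (groupby-style) and then checking that every valid run's length is below sem_len.
import Mathlib
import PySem

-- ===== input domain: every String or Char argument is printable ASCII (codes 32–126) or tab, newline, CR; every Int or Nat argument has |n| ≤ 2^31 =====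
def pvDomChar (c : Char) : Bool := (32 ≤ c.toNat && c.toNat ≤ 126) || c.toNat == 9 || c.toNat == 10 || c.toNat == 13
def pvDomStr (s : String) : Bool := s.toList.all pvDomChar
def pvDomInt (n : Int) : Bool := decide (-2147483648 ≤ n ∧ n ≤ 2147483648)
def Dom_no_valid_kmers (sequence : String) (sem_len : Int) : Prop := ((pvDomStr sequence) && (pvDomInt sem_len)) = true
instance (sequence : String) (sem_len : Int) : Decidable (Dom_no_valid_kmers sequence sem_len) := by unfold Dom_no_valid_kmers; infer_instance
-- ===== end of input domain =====

-- B replaces A's running counter with early return by segmenting the sequence into maximal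
-- valid/invalid runs and checking all valid-run lengths (objective: alternative decomposition).

-- ===== PORT A =====
-- membership in {'A','C','T','G'}
def pvValidBase (c : Char) : Bool := c = 'A' || c = 'C' || c = 'T' || c = 'G'

-- A's loop: per-character scan with a running counter and early False return
def pvGoA (sem_len : Int) : List Char → Int → Bool
  | [], _ => true
  | c :: cs, cur =>
    if pvValidBase c then
      if sem_len ≤ cur + 1 then false else pvGoA sem_len cs (cur + 1)
    else pvGoA sem_len cs 0

def no_valid_kmers (sequence : String) (sem_len : Int) : Bool :=
  pvGoA sem_len sequence.toList 0

-- ===== PORT B =====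
-- Source B's run segmentation: maximal runs of equal validity, as (key, length) pairs
def pvGroups : List Char → List (Bool × Nat)
  | [] => []
  | c :: cs =>
    let k := pvValidBase c
    (k, (cs.takeWhile (fun d => pvValidBase d == k)).length + 1)
      :: pvGroups (cs.dropWhile (fun d => pvValidBase d == k))
termination_by cs => cs.length
decreasing_by
  simpa using Nat.lt_succ_of_le (List.length_dropWhile_le _ _)

def no_valid_kmers_alt (sequence : String) (sem_len : Int) : Bool :=
  ((pvGroups sequence.toList).filter (·.1)).all (fun p => decide ((p.2 : Int) < sem_len))

-- ===== PRECONDITION & SPEC =====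
def Spec_no_valid_kmers (sequence : String) (sem_len : Int) (out : Bool) : Prop := out = no_valid_kmers_alt sequence sem_len
instance (sequence : String) (sem_len : Int) (out : Bool) : Decidable (Spec_no_valid_kmers sequence sem_len out) := by unfold Spec_no_valid_kmers; infer_instance

-- ===== CLAIM (what is proved, stated in full; the proofs are below) =====
def Claim_equal_no_valid_kmers : Prop := ∀ (sequence : String) (sem_len : Int), Dom_no_valid_kmers sequence sem_len → Spec_no_valid_kmers sequence sem_len (no_valid_kmers sequence sem_len)

-- ===== LEMMAS AND PROOFS =====

-- A's loop on a list, factored through its leading valid run: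
-- it fails iff the leading run is nonempty and pushes the counter to sem_len, and
-- otherwise continues from counter 0 on the rest (whose head is invalid or absent).
theorem pvGoA_run (k : Int) : ∀ (cs : List Char) (cur : Int),
    pvGoA k cs cur =
      ((decide (cs.takeWhile pvValidBase = [] ∨ (cur + (cs.takeWhile pvValidBase).length : Int) < k))
        && pvGoA k (cs.dropWhile pvValidBase) 0) := by
  intro cs
  induction cs with
  | nil => intro cur; simp [pvGoA]
  | cons c cs ih =>
    intro cur
    by_cases hv : pvValidBase c = true
    · simp only [pvGoA, hv, if_pos, List.takeWhile_cons, List.dropWhile_cons]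
      by_cases hk : k ≤ cur + 1
      · have : ¬ ((cur + ((cs.takeWhile pvValidBase).length + 1) : Int) < k) := by
          have : (0:Int) ≤ (cs.takeWhile pvValidBase).length := by positivity
          omega
        simp [hk, this]
      · rw [if_neg hk, ih (cur + 1)]
        congr 1
        by_cases he : cs.takeWhile pvValidBase = []
        · simp [he]; omega
        · simp [he]
          constructor <;> intro h <;> [skip; skip] <;> push_cast at * <;> omega
    · simp only [pvGoA, hv, List.takeWhile_cons, List.dropWhile_cons]
      simp [hv, pvGoA]

-- A's loop at counter 0 ignores a leading invalid prefix.
theorem pvGoA_skip_invalid (k : Int) : ∀ (cs : List Char),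
    pvGoA k (cs.dropWhile (fun d => !pvValidBase d)) 0 = pvGoA k cs 0 := by
  intro cs
  induction cs with
  | nil => rfl
  | cons c cs ih =>
    by_cases hv : pvValidBase c = true
    · simp [hv]
    · have hv' : pvValidBase c = false := by simpa using hv
      simp [hv', pvGoA, ih]

-- the check Source B performs on a group list
def pvAllCheck (k : Int) (l : List (Bool × Nat)) : Bool :=
  (l.filter (·.1)).all (fun p => decide ((p.2 : Int) < k))

theorem pvBeq_true_fun : (fun d => pvValidBase d == true) = pvValidBase := by
  funext d; simp

theorem pvBeq_false_fun : (fun d => pvValidBase d == false) = (fun d => !pvValidBase d) := by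
  funext d; cases h : pvValidBase d <;> simp

-- main bridge: A's scan from counter 0 equals B's check over the run groups
theorem pvMain (k : Int) : ∀ (n : Nat) (cs : List Char), cs.length ≤ n →
    pvGoA k cs 0 = pvAllCheck k (pvGroups cs) := by
  intro n
  induction n with
  | zero =>
    intro cs h
    have : cs = [] := List.eq_nil_of_length_eq_zero (Nat.le_zero.mp h)
    subst this; simp [pvGoA, pvAllCheck, pvGroups]
  | succ n ih =>
    intro cs h
    cases cs with
    | nil => simp [pvGoA, pvAllCheck, pvGroups]
    | cons c cs =>
      by_cases hv : pvValidBase c = true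
      · have hgroups : pvGroups (c :: cs) =
            (true, (cs.takeWhile pvValidBase).length + 1) :: pvGroups (cs.dropWhile pvValidBase) := by
          rw [pvGroups]; simp only [hv, pvBeq_true_fun]
        have hlen : (cs.dropWhile pvValidBase).length ≤ n := by
          have := List.length_dropWhile_le pvValidBase cs
          simp at h; omega
        rw [hgroups]
        rw [pvGoA_run k (c :: cs) 0]
        simp only [List.takeWhile_cons, List.dropWhile_cons, hv, if_pos]
        rw [ih _ hlen]
        simp only [pvAllCheck, List.filter_cons]
        push_cast
        simp only [false_or]
        norm_num
      · have hv' : pvValidBase c = false := by simpa using hv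
        have hgroups : pvGroups (c :: cs) =
            (false, (cs.takeWhile (fun d => !pvValidBase d)).length + 1)
              :: pvGroups (cs.dropWhile (fun d => !pvValidBase d)) := by
          rw [pvGroups]; simp only [hv', pvBeq_false_fun]
        have hlen : (cs.dropWhile (fun d => !pvValidBase d)).length ≤ n := by
          have := List.length_dropWhile_le (fun d => !pvValidBase d) cs
          simp at h; omega
        rw [hgroups]
        have : pvGoA k (c :: cs) 0 = pvGoA k cs 0 := by simp [pvGoA, hv']
        rw [this, ← pvGoA_skip_invalid k cs, ih _ hlen]
        simp [pvAllCheck]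

-- ===== VERDICT (by name: the statement is the Claim_ definition above) =====
theorem no_valid_kmers_spec : Claim_equal_no_valid_kmers := by
  intro sequence sem_len _
  unfold Spec_no_valid_kmers no_valid_kmers no_valid_kmers_alt
  exact pvMain sem_len sequence.toList.length sequence.toList le_rfl
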